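-- pv_equiv track=rewrite | github.com/locharp/code-snippets | Coding Ninjas/Hard/Help Ninja to Cross River.py | crossRiver
-- ===== SOURCE A (Python) =====
-- from functools import cache
--
-- def crossRiver( safe ):
--
-- 	if safe[1] != safe[0] + 1:
-- 		return False
--
-- 	n = len( safe )
--
-- 	@cache
-- 	def f( i, x ):
--
-- 		if i + 1 == n:
-- 			return True
--
-- 		p = safe[i] + x - 2
-- 		q = safe[i] + x + 2
--
-- 		for j in range( i + 1, n ):
-- 			if safe[j] > p and safe[j] < q:
-- 				if f( j, safe[j] - safe[i] ):
-- 					return True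
-- 			elif safe[j] > safe[i] + x + 1:
-- 				return False
--
--
--
-- 		return False
--
--
--
-- 	return f( 1, 1 )
-- ===== SOURCE B (Python) =====
-- def crossRiver(safe):
--     # Bottom-up tabulation of the jump DP: states (i, x) for every incoming-jump
--     # difference x = safe[i]-safe[k], k < i, filled from the last stone backwards,
--     # instead of top-down memoized recursion.
--     if safe[1] != safe[0] + 1:
--         return False
--     n = len(safe)
--     memo = {}
--     for i in range(n - 1, 0, -1):
--         for k in range(i):
--             x = safe[i] - safe[k]
--             if i + 1 == n:
--                 memo[(i, x)] = True
--                 continue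
--             res = False
--             j = i + 1
--             while j < n and safe[j] <= safe[i] + x + 1:
--                 if safe[j] >= safe[i] + x - 1 and memo[(j, safe[j] - safe[i])]:
--                     res = True
--                     break
--                 j += 1
--             memo[(i, x)] = res
--     return memo[(1, 1)]
-- ===== Notes on version B (the rewrite author's own statement) =====
-- stated objective: alternative
-- what changed: Replaced the top-down @cache recursion f(i,x) by an explicit bottom-up tabulation: iterating stones from last to first, a dictionary memo[(i,x)] is filled for every incoming-jump difference x = safe[i]-safe[k] (k < i), the inner scan reading only already-tabulated rows; the answer is memo[(1,1)].
-- outside the precondition, e.g. on crossRiver([1]): A raises IndexError, B raises IndexError; on crossRiver([]): A raises IndexError, B raises IndexError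
import Mathlib
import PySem

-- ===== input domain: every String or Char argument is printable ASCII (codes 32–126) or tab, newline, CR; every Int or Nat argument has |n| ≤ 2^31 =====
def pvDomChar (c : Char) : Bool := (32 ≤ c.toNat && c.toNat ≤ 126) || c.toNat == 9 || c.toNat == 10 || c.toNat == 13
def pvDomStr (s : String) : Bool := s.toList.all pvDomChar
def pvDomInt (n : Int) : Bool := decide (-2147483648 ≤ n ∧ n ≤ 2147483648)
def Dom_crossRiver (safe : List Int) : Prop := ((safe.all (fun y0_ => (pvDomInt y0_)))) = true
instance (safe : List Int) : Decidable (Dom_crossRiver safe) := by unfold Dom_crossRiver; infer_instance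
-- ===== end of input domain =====

-- B replaces A's top-down memoized recursion by a bottom-up tabulation of the same jump DP
-- (alternative decomposition; return-value equivalence, proved below).


-- ===== PORT A =====
-- the scan 'for j in range(i+1, n): …' of A's helper f(i, x); the recursive call
-- 'f(j, safe[j]-safe[i])' has f's base test 'i+1 == n' inlined at the call site
def crossRiverGA (safe : List Int) (n i : Nat) (x : Int) (j : Nat) : Bool :=
  if _h : j < n then
    let si := PySem.List.pyGetD safe (i : Int) 0
    let sj := PySem.List.pyGetD safe (j : Int) 0
    if sj > si + x - 2 ∧ sj < si + x + 2 then
      if (if j + 1 = n then true else crossRiverGA safe n j (sj - si) (j + 1)) then true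
      else crossRiverGA safe n i x (j + 1)
    else if sj > si + x + 1 then false
    else crossRiverGA safe n i x (j + 1)
  else false
termination_by n - j

-- A's helper f(i, x)
def crossRiverF (safe : List Int) (n i : Nat) (x : Int) : Bool :=
  if i + 1 = n then true else crossRiverGA safe n i x (i + 1)

def crossRiver (safe : List Int) : Bool :=
  if PySem.List.pyGetD safe 1 0 ≠ PySem.List.pyGetD safe 0 0 + 1 then false
  else crossRiverF safe safe.length 1 1

-- ===== PORT B =====
-- B's inner 'while j < n and safe[j] <= safe[i]+x+1: …' loop (res/break become
-- the returned Bool); Python's memo[(j, d)] is ported as getD with default false: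
-- the key is always present when looked up (established by the proofs below)
def crossRiverScanB (safe : List Int) (n : Nat) (memo : PySem.Dict (Int × Int) Bool)
    (i : Nat) (x : Int) (j : Nat) : Bool :=
  if _h : j < n then
    let si := PySem.List.pyGetD safe (i : Int) 0
    let sj := PySem.List.pyGetD safe (j : Int) 0
    if sj ≤ si + x + 1 then
      if sj ≥ si + x - 1 ∧ memo.getD ((j : Int), sj - si) false = true then true
      else crossRiverScanB safe n memo i x (j + 1)
    else false
  else false
termination_by n - j

-- B's inner 'for k in range(i): …' loop body, one value of i
def crossRiverStepB (safe : List Int) (n : Nat) (memo : PySem.Dict (Int × Int) Bool)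
    (i : Nat) : PySem.Dict (Int × Int) Bool :=
  (PySem.List.pyRange 0 (i : Int) 1).foldl
    (fun m k =>
      let x := PySem.List.pyGetD safe (i : Int) 0 - PySem.List.pyGetD safe k 0
      m.insert ((i : Int), x)
        (if i + 1 = n then true else crossRiverScanB safe n m i x (i + 1)))
    memo

def crossRiver_alt (safe : List Int) : Bool :=
  if PySem.List.pyGetD safe 1 0 ≠ PySem.List.pyGetD safe 0 0 + 1 then false
  else
    let n := safe.length
    let memo := (PySem.List.pyRange ((n : Int) - 1) 0 (-1)).foldl
      (fun m i => crossRiverStepB safe n m i.toNat) PySem.Dict.empty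
    -- Python's memo[(1, 1)]: the key is always present here (n ≥ 2 and the guard passed)
    memo.getD ((1 : Int), (1 : Int)) false

-- ===== PRECONDITION & SPEC =====
-- Pre_ excludes lists of length < 2, on which A raises IndexError at safe[1]
def Pre_crossRiver (safe : List Int) : Prop := 2 ≤ safe.length
instance (safe : List Int) : Decidable (Pre_crossRiver safe) := by
  unfold Pre_crossRiver; infer_instance
def pvWitness_crossRiver : List Int := [0, 1, 3]

def Spec_crossRiver (safe : List Int) (out : Bool) : Prop := out = crossRiver_alt safe
instance (safe : List Int) (out : Bool) : Decidable (Spec_crossRiver safe out) := by unfold Spec_crossRiver; infer_instance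

-- ===== CLAIM (what is proved, stated in full; the proofs are below) =====
def Claim_equal_crossRiver : Prop := ∀ (safe : List Int), Dom_crossRiver safe → Pre_crossRiver safe → Spec_crossRiver safe (crossRiver safe)

-- ===== LEMMAS AND PROOFS =====

-- the memo table agrees with A's f on every key (j, safe[j]-safe[k]), t ≤ j < n, k < j
def pvInv (safe : List Int) (n : Nat) (memo : PySem.Dict (Int × Int) Bool) (t : Nat) : Prop :=
  ∀ j k : Nat, t ≤ j → j < n → k < j →
    memo.get? ((j : Int), safe.getD j 0 - safe.getD k 0)
      = some (crossRiverF safe n j (safe.getD j 0 - safe.getD k 0))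

-- keys at row i, if present, carry the value of A's f
def pvRowOK (safe : List Int) (n : Nat) (memo : PySem.Dict (Int × Int) Bool) (i : Nat) : Prop :=
  ∀ x : Int, memo.get? ((i : Int), x) = none ∨
    memo.get? ((i : Int), x) = some (crossRiverF safe n i x)

lemma pv_scan_eq (safe : List Int) (n : Nat) (memo : PySem.Dict (Int × Int) Bool)
    (i : Nat) (x : Int) (hInv : pvInv safe n memo (i + 1)) :
    ∀ (m j : Nat), n - j ≤ m → i < j →
      crossRiverScanB safe n memo i x j = crossRiverGA safe n i x j := by
  intro m
  induction m with
  | zero =>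
    intro j hm _
    rw [crossRiverScanB, crossRiverGA]
    have : ¬ j < n := by omega
    simp [this]
  | succ m ih =>
    intro j hm hij
    rw [crossRiverScanB, crossRiverGA]
    by_cases hj : j < n
    · simp only [hj, dif_pos]
      have hget : memo.getD ((j : Int), safe.getD j 0 - safe.getD i 0) false
          = crossRiverF safe n j (safe.getD j 0 - safe.getD i 0) := by
        exact PySem.Dict.getD_of_get?_eq_some _ _ (hInv j i (by omega) hj hij)
      simp only [PySem.List.pyGetD_natCast]
      set si := safe.getD i 0 with hsi
      set sj := safe.getD j 0 with hsj
      by_cases hw : sj > si + x - 2 ∧ sj < si + x + 2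
      · have h1 : sj ≤ si + x + 1 := by omega
        have h2 : sj ≥ si + x - 1 := by omega
        simp only [hw, if_pos, h1, if_pos]
        rw [hget]
        by_cases hf : crossRiverF safe n j (sj - si) = true
        · have hf' : (if j + 1 = n then true else crossRiverGA safe n j (sj - si) (j + 1)) = true := by
            rw [crossRiverF] at hf; exact hf
          simp [h2, hf, hf']
        · have hf' : (if j + 1 = n then true else crossRiverGA safe n j (sj - si) (j + 1)) = false := by
            rw [crossRiverF] at hf; simpa using hf
          simp only [hf', Bool.false_eq_true]
          have hrec := ih (j + 1) (by omega) (by omega)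
          simp [h2, hf, hrec]
      · by_cases hfar : sj > si + x + 1
        · have h1 : ¬ sj ≤ si + x + 1 := by omega
          simp [hw, hfar, h1]
        · have h1 : sj ≤ si + x + 1 := by omega
          have h2 : ¬ (sj ≥ si + x - 1 ∧ memo.getD ((j : Int), sj - si) false = true) := by
            intro hc
            exact hw ⟨by omega, by omega⟩
          have hrec := ih (j + 1) (by omega) (by omega)
          simp [hw, hfar, h1, hrec]
          intro hge _
          exact absurd hge (by omega)
    · simp [hj]

-- one full inner loop (over the list l of k values) starting from memo
lemma pv_inner (safe : List Int) (n : Nat) (i : Nat) :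
    ∀ (l : List Int) (memo : PySem.Dict (Int × Int) Bool),
      pvInv safe n memo (i + 1) → pvRowOK safe n memo i →
      (∀ key : Int × Int, key.1 ≠ (i : Int) →
          (l.foldl (fun m k =>
            let x := PySem.List.pyGetD safe (i : Int) 0 - PySem.List.pyGetD safe k 0
            m.insert ((i : Int), x)
              (if i + 1 = n then true else crossRiverScanB safe n m i x (i + 1))) memo).get? key
            = memo.get? key) ∧
      pvRowOK safe n (l.foldl (fun m k =>
            let x := PySem.List.pyGetD safe (i : Int) 0 - PySem.List.pyGetD safe k 0
            m.insert ((i : Int), x)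
              (if i + 1 = n then true else crossRiverScanB safe n m i x (i + 1))) memo) i ∧
      (∀ x : Int, memo.get? ((i : Int), x) = some (crossRiverF safe n i x) →
          (l.foldl (fun m k =>
            let x := PySem.List.pyGetD safe (i : Int) 0 - PySem.List.pyGetD safe k 0
            m.insert ((i : Int), x)
              (if i + 1 = n then true else crossRiverScanB safe n m i x (i + 1))) memo).get? ((i : Int), x)
            = some (crossRiverF safe n i x)) ∧
      (∀ k : Nat, (k : Int) ∈ l →
          (l.foldl (fun m k =>
            let x := PySem.List.pyGetD safe (i : Int) 0 - PySem.List.pyGetD safe k 0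
            m.insert ((i : Int), x)
              (if i + 1 = n then true else crossRiverScanB safe n m i x (i + 1))) memo).get?
              ((i : Int), safe.getD i 0 - safe.getD k 0)
            = some (crossRiverF safe n i (safe.getD i 0 - safe.getD k 0))) := by
  intro l
  induction l with
  | nil =>
    exact fun memo _ hC => ⟨fun _ _ => rfl, hC, fun _ hx => hx, by simp⟩
  | cons k0 t ih =>
    intro memo h1 hC
    simp only [List.foldl_cons]
    set x0 := PySem.List.pyGetD safe (i : Int) 0 - PySem.List.pyGetD safe k0 0 with hx0
    set v0 := (if i + 1 = n then true else crossRiverScanB safe n memo i x0 (i + 1)) with hv0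
    have hv : v0 = crossRiverF safe n i x0 := by
      rw [crossRiverF]
      by_cases hn : i + 1 = n
      · simp [hv0, hn]
      · rw [hv0, if_neg hn, if_neg hn]
        exact pv_scan_eq safe n memo i x0 h1 n (i + 1) (by omega) (by omega)
    have hne0 : ∀ key : Int × Int, key.1 ≠ (i : Int) → key ≠ ((i : Int), x0) := by
      intro key hkey h
      exact hkey (by rw [h])
    have h1' : pvInv safe n (memo.insert ((i : Int), x0) v0) (i + 1) := by
      intro j k hj hjn hk
      rw [PySem.Dict.get?_insert]
      rw [if_neg (hne0 _ (by simp; omega))]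
      exact h1 j k hj hjn hk
    have hC' : pvRowOK safe n (memo.insert ((i : Int), x0) v0) i := by
      intro x
      rw [PySem.Dict.get?_insert]
      by_cases hx : (((i : Int), x) = ((i : Int), x0))
      · right
        rw [if_pos hx]
        have hxx : x = x0 := (Prod.mk.injEq _ _ _ _ ▸ hx).2
        rw [hv, hxx]
      · rw [if_neg hx]
        exact hC x
    obtain ⟨i1, i2, i3, i4⟩ := ih (memo.insert ((i : Int), x0) v0) h1' hC'
    refine ⟨?_, i2, ?_, ?_⟩
    · intro key hkey
      rw [i1 key hkey, PySem.Dict.get?_insert, if_neg (hne0 key hkey)]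
    · intro x hx
      apply i3
      rw [PySem.Dict.get?_insert]
      by_cases hxx : (((i : Int), x) = ((i : Int), x0))
      · rw [if_pos hxx]
        have hxe : x = x0 := (Prod.mk.injEq _ _ _ _ ▸ hxx).2
        rw [hv, hxe]
      · rw [if_neg hxx]
        exact hx
    · intro k hkmem
      rcases List.mem_cons.mp hkmem with hk0 | hkt
      · have hxk : safe.getD i 0 - safe.getD k 0 = x0 := by
          rw [hx0, ← hk0]
          simp
        rw [hxk]
        apply i3
        rw [PySem.Dict.get?_insert, if_pos rfl, hv]
      · exact i4 k hkt

lemma pv_outer (safe : List Int) (n : Nat) :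
    ∀ (a : Nat) (memo : PySem.Dict (Int × Int) Bool), a < n →
      pvInv safe n memo (a + 1) →
      (∀ (t : Int) (x : Int), t ≤ (a : Int) → memo.get? (t, x) = none) →
      pvInv safe n ((PySem.List.pyRange (a : Int) 0 (-1)).foldl
        (fun m i => crossRiverStepB safe n m i.toNat) memo) 1 := by
  intro a
  induction a with
  | zero =>
    intro memo _ h1 _
    rw [PySem.List.pyRange_neg_one_eq_nil (by simp)]
    exact h1
  | succ a ih =>
    intro memo han h1 h0
    rw [PySem.List.pyRange_neg_one_cons (by exact_mod_cast Nat.succ_pos a)]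
    have hcast : ((a + 1 : Nat) : Int) - 1 = (a : Int) := by push_cast; ring
    rw [List.foldl_cons, hcast]
    have hC : pvRowOK safe n memo (a + 1) := fun x =>
      Or.inl (h0 _ x (le_refl _))
    obtain ⟨p1, p2, p3, p4⟩ :=
      pv_inner safe n (a + 1) (PySem.List.pyRange 0 ((a + 1 : Nat) : Int) 1) memo h1 hC
    have hstep : crossRiverStepB safe n memo (((a + 1 : Nat) : Int)).toNat
        = (PySem.List.pyRange 0 ((a + 1 : Nat) : Int) 1).foldl
          (fun m k =>
            let x := PySem.List.pyGetD safe ((a + 1 : Nat) : Int) 0 - PySem.List.pyGetD safe k 0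
            m.insert (((a + 1 : Nat) : Int), x)
              (if (a + 1) + 1 = n then true
               else crossRiverScanB safe n m (a + 1) x ((a + 1) + 1))) memo := by
      rw [crossRiverStepB]
      simp
    rw [hstep]
    set memo' := (PySem.List.pyRange 0 ((a + 1 : Nat) : Int) 1).foldl
          (fun m k =>
            let x := PySem.List.pyGetD safe ((a + 1 : Nat) : Int) 0 - PySem.List.pyGetD safe k 0
            m.insert (((a + 1 : Nat) : Int), x)
              (if (a + 1) + 1 = n then true
               else crossRiverScanB safe n m (a + 1) x ((a + 1) + 1))) memo with hmemo'
    apply ih memo' (by omega)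
    · intro j k hj hjn hk
      by_cases hja : j = a + 1
      · subst hja
        have hkmem : ((k : Nat) : Int) ∈ PySem.List.pyRange 0 ((a + 1 : Nat) : Int) 1 := by
          rw [PySem.List.mem_pyRange_one]
          constructor
          · exact_mod_cast Nat.zero_le k
          · exact_mod_cast hk
        exact p4 k hkmem
      · rw [p1 _ (by simp; omega)]
        exact h1 j k (by omega) hjn hk
    · intro t x ht
      rw [p1 (t, x) (by simp; intro h; omega)]
      exact h0 t x (by push_cast; omega)

-- ===== VERDICT (by name: the statement is the Claim_ definition above) =====
theorem crossRiver_spec : Claim_equal_crossRiver := by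
  intro safe _ hpre
  unfold Spec_crossRiver
  rw [crossRiver, crossRiver_alt]
  by_cases hg : PySem.List.pyGetD safe 1 0 ≠ PySem.List.pyGetD safe 0 0 + 1
  · rw [if_pos hg, if_pos hg]
  · rw [if_neg hg, if_neg hg]
    have hn : 2 ≤ safe.length := hpre
    have hInv := pv_outer safe safe.length (safe.length - 1) PySem.Dict.empty (by omega)
      (fun j k hj hjn hk => absurd hjn (by omega))
      (fun t x _ => PySem.Dict.get?_empty _)
    have hcast : ((safe.length - 1 : Nat) : Int) = (safe.length : Int) - 1 := by omega
    rw [hcast] at hInv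
    have hkey := hInv 1 0 (le_refl 1) (by omega) (by omega)
    have hg1 : safe.getD 1 0 - safe.getD 0 0 = 1 := by
      have h := not_not.mp hg
      simp only [PySem.List.pyGetD_ofNat'] at h
      omega
    rw [hg1] at hkey
    push_cast at hkey
    exact (PySem.Dict.getD_of_get?_eq_some _ _ hkey).symm
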